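-- pv_equiv track=rewrite | github.com/franwindav/3_kurs_mai | КОМПМАТ-4сем/Lab_1.py | Lab_4
-- ===== SOURCE A (Python) =====
-- def Scheme(poly, a):
--     output = [poly[0]]
--     for i in range(len(poly) - 1):
--         output.append(a * output[i] + poly[i + 1])
--     return output
--
-- def Lab_4(poly):
--     answer = [0, 0]
--
--     if poly[0] < 0: poly = [i * -1 for i in poly]
--     for i in range(1000000):
--         temp = Scheme(poly, i)
--         f = True
--         for j in temp:
--             if j < 0:
--                 f = False
--                 break
--         if f == True:
--             answer[1] = i
--             break
--
--     poly = [i * (-1) ** (len(poly) - 1) for i in poly]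
--     for i in range(len(poly)):
--         poly[i] = poly[i] * (-1) ** (len(poly) - i - 1)
--     for i in range(1000000):
--         temp = Scheme(poly, i)
--         f = True
--         for j in temp:
--             if j < 0:
--                 f = False
--                 break
--         if f == True:
--             answer[0] = -1 * i
--             break
--
--     return answer
-- ===== SOURCE B (Python) =====
-- N = 10 ** 6
--
-- def _ok(p, a):
--     # all Horner intermediate values of p at a are nonnegative
--     s = 0
--     for c in p:
--         s = a * s + c
--         if s < 0:
--             return False
--     return True
--
-- def _bound(p):
--     # least i in range(N) with _ok(p, i), else 0; _ok is monotone in i,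
--     # so gallop for an upper bound, then binary search.
--     if _ok(p, 0):
--         return 0
--     hi = 1
--     while not _ok(p, hi):
--         if hi >= N - 1:
--             return 0
--         hi = min(hi * 2, N - 1)
--     lo = hi // 2 + 1
--     while lo < hi:
--         mid = (lo + hi) // 2
--         if _ok(p, mid):
--             hi = mid
--         else:
--             lo = mid + 1
--     return lo
--
-- def Lab_4(poly):
--     p = [-c for c in poly] if poly[0] < 0 else list(poly)
--     q = [c if i % 2 == 0 else -c for i, c in enumerate(p)]
--     return [-_bound(q), _bound(p)]
-- ===== Notes on version B (the rewrite author's own statement) =====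
-- stated objective: faster
-- what changed: Replaces A's linear scan over 10^6 candidate bounds (each building the full synthetic-division list) by a galloping-then-binary search that exploits monotonicity of the all-nonnegative check, using an allocation-free early-exit Horner pass instead of materialising the Scheme list.
import Mathlib
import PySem

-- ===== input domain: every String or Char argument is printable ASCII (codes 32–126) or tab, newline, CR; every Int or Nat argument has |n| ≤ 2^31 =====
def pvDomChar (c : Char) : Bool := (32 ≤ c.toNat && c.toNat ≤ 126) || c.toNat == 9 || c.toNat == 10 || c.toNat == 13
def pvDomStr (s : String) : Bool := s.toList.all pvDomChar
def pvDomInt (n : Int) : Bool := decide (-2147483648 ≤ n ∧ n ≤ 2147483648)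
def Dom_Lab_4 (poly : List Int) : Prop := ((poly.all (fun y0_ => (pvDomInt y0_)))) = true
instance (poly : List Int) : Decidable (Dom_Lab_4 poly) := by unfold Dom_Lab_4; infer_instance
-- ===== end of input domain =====

-- B replaces A's linear scan over 10^6 candidates by a galloping-then-binary search (the
-- all-nonnegative synthetic-division check is monotone in the candidate), with an allocation-free early-exit Horner pass.

-- ===== PORT A =====
-- Scheme: output = [poly[0]]; for i in range(len-1): output.append(a*output[i] + poly[i+1])
def SchemeGo (a : Int) (prev : Int) : List Int → List Int
  | [] => []
  | c :: cs => (a * prev + c) :: SchemeGo a (a * prev + c) cs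

def Scheme (poly : List Int) (a : Int) : List Int :=
  poly.headD 0 :: SchemeGo a (poly.headD 0) poly.tail

-- inner loop: f = True; for j in temp: if j < 0: f = False; break
def allNN : List Int → Bool
  | [] => true
  | j :: js => if j < 0 then false else allNN js

-- for i in range(1000000): if all coefficients nonneg: answer = i; break  (answer stays 0 otherwise)
def goA (poly : List Int) (i : Int) : Nat → Int
  | 0 => 0
  | fuel + 1 => if allNN (Scheme poly i) then i else goA poly (i + 1) fuel

-- the two sign-flipping passes before the second search
def transformA (poly : List Int) : List Int :=
  let n := poly.length
  let p1 := poly.map (fun c => c * (-1 : Int) ^ (n - 1))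
  (PySem.List.enumerate p1).map (fun ic => ic.2 * (-1 : Int) ^ (((n : Int) - ic.1 - 1).toNat))

def Lab_4 (poly : List Int) : List Int :=
  let poly1 := if poly.headD 0 < 0 then poly.map (fun c => c * (-1)) else poly
  let upper := goA poly1 0 1000000
  let poly2 := transformA poly1
  let lower := goA poly2 0 1000000
  [-1 * lower, upper]

-- ===== PORT B =====
-- _ok: Horner evaluation with early exit on a negative intermediate value
def checkB (a : Int) (s : Int) : List Int → Bool
  | [] => true
  | c :: cs => if a * s + c < 0 then false else checkB a (a * s + c) cs

def okB (p : List Int) (a : Int) : Bool := checkB a 0 p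

-- while lo < hi: mid = (lo+hi)//2; if ok(mid): hi = mid else lo = mid+1
def bgo (p : List Int) (lo hi : Nat) : Nat :=
  if lo < hi then
    if okB p (((lo + hi) / 2 : Nat) : Int) then bgo p lo ((lo + hi) / 2)
    else bgo p ((lo + hi) / 2 + 1) hi
  else lo
termination_by hi - lo
decreasing_by
  · omega
  · omega

-- gallop: hi = 1, 2, 4, …; Python's while-loop runs at most 21 times (hi ≥ 999999 after 20
-- doublings forces an exit), so fuel 21 makes this a faithful port of the unbounded loop;
-- the fuel-0 branch is unreachable (shown in galB_eq).
def galB (p : List Int) (hi : Nat) : Nat → Int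
  | 0 => 0
  | f + 1 =>
      if okB p (hi : Int) then ((bgo p (hi / 2 + 1) hi : Nat) : Int)
      else if 999999 ≤ hi then 0
      else galB p (min (2 * hi) 999999) f

def boundB (p : List Int) : Int :=
  if okB p 0 then 0 else galB p 1 21

def Lab_4_alt (poly : List Int) : List Int :=
  let p := if poly.headD 0 < 0 then poly.map (fun c => -c) else poly
  let q := (PySem.List.enumerate p).map (fun ic => if ic.1 % 2 == 0 then ic.2 else -ic.2)
  [-(boundB q), boundB p]

-- ===== PRECONDITION & SPEC =====
-- Pre_ excludes only the empty list, on which the Python A raises IndexError (poly[0]).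
def Pre_Lab_4 (poly : List Int) : Prop := poly ≠ []
instance (poly : List Int) : Decidable (Pre_Lab_4 poly) := by unfold Pre_Lab_4; infer_instance
def pvWitness_Lab_4 : List Int := [1, -3]

def Spec_Lab_4 (poly : List Int) (out : List Int) : Prop := out = Lab_4_alt poly
instance (poly : List Int) (out : List Int) : Decidable (Spec_Lab_4 poly out) := by unfold Spec_Lab_4; infer_instance

-- ===== CLAIM (what is proved, stated in full; the proofs are below) =====
def Claim_equal_Lab_4 : Prop := ∀ (poly : List Int), Dom_Lab_4 poly → Pre_Lab_4 poly → Spec_Lab_4 poly (Lab_4 poly)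

-- ===== LEMMAS AND PROOFS =====

-- A's all-nonneg check of the synthetic-division list equals B's Horner early-exit check
theorem checkB_eq_allNN_go (a : Int) : ∀ (rest : List Int) (prev : Int),
    allNN (SchemeGo a prev rest) = checkB a prev rest := by
  intro rest
  induction rest with
  | nil => intro prev; rfl
  | cons c cs ih =>
      intro prev
      simp [SchemeGo, allNN, checkB, ih]

theorem ok_bridge (p : List Int) (a : Int) : allNN (Scheme p a) = okB p a := by
  cases p with
  | nil => rfl
  | cons c cs =>
      simp [Scheme, allNN, okB, checkB, checkB_eq_allNN_go]

-- monotonicity of the Horner check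
theorem checkB_mono : ∀ (rest : List Int) (a b sa sb : Int), 0 ≤ a → a ≤ b → 0 ≤ sa → sa ≤ sb →
    checkB a sa rest = true → checkB b sb rest = true := by
  intro rest
  induction rest with
  | nil => intro a b sa sb _ _ _ _ _; rfl
  | cons c cs ih =>
      intro a b sa sb ha hab hsa hsab h
      have hmul : a * sa ≤ b * sb := mul_le_mul hab hsab hsa (le_trans ha hab)
      simp only [checkB] at h ⊢
      by_cases hneg : a * sa + c < 0
      · simp [hneg] at h
      · have h1 : ¬ b * sb + c < 0 := by omega
        simp only [hneg, if_false] at h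
        simp only [h1, if_false]
        exact ih a b (a * sa + c) (b * sb + c) ha hab (by omega) (by omega) h

theorem okB_mono (p : List Int) (a b : Int) (ha : 0 ≤ a) (hab : a ≤ b)
    (h : okB p a = true) : okB p b = true :=
  checkB_mono p a b 0 0 ha hab le_rfl le_rfl h

-- binary-search specification
theorem bgo_spec (p : List Int) : ∀ (fuel lo hi : Nat), hi - lo ≤ fuel → lo ≤ hi →
    okB p hi = true → (∀ j : Nat, j < lo → okB p j = false) →
    okB p (bgo p lo hi) = true ∧ (∀ j : Nat, j < bgo p lo hi → okB p j = false) ∧ bgo p lo hi ≤ hi := by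
  intro fuel
  induction fuel with
  | zero =>
      intro lo hi hfuel hle hhi hlo
      have : lo = hi := by omega
      subst this
      rw [bgo, if_neg (lt_irrefl lo)]
      exact ⟨hhi, hlo, le_rfl⟩
  | succ f ih =>
      intro lo hi hfuel hle hhi hlo
      rw [bgo]
      by_cases hlt : lo < hi
      · simp only [hlt, if_true]
        by_cases hmid : okB p (((lo + hi) / 2 : Nat) : Int) = true
        · simp only [hmid, if_true]
          exact And.imp_right (And.imp_right (fun h => le_trans h (by omega)))
            (ih lo ((lo + hi) / 2) (by omega) (by omega) hmid hlo)
        · simp only [hmid]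
          refine ih ((lo + hi) / 2 + 1) hi (by omega) (by omega) hhi ?_
          intro j hj
          by_cases hjlo : j < lo
          · exact hlo j hjlo
          · by_contra hcon
            simp only [Bool.not_eq_false] at hcon
            have hjt : okB p j = true := hcon
            have : okB p (((lo + hi) / 2 : Nat) : Int) = true := by
              apply okB_mono p j _ (by positivity) (by push_cast; omega) hjt
            exact hmid this
      · simp only [hlt, if_false]
        have : lo = hi := by omega
        subst this
        exact ⟨hhi, hlo, le_rfl⟩

-- when the check fails at 999999 it fails everywhere below, so A's scan exhausts and returns 0
theorem goA_allfalse (p : List Int) : ∀ (fuel : Nat) (i : Int), 0 ≤ i → i + fuel ≤ 1000000 →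
    (∀ j : Int, 0 ≤ j → j < 1000000 → okB p j = false) → goA p i fuel = 0 := by
  intro fuel
  induction fuel with
  | zero => intro i _ _ _; rfl
  | succ f ih =>
      intro i hi hfi hall
      have h : allNN (Scheme p i) = false := by
        rw [ok_bridge]; exact hall i hi (by omega)
      simp only [goA, h, Bool.false_eq_true, if_false]
      exact ih (i + 1) (by omega) (by push_cast at hfi ⊢; omega) hall

-- A's linear scan reaches exactly the least index found by the binary search
theorem goA_finds (p : List Int) (r : Nat)
    (hok : okB p (r : Int) = true) (hbelow : ∀ j : Nat, j < r → okB p (j : Int) = false)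
    (hr : r ≤ 999999) : ∀ (fuel : Nat) (i : Int), 0 ≤ i → i + fuel = 1000000 → i ≤ (r : Int) →
    goA p i fuel = (r : Int) := by
  intro fuel
  induction fuel with
  | zero => intro i _ hif hir; omega
  | succ f ih =>
      intro i hi hif hir
      by_cases heq : i = (r : Int)
      · subst heq
        simp only [goA, ok_bridge, hok, if_true]
      · have hilt : i < (r : Int) := lt_of_le_of_ne hir heq
        have hfalse : okB p i = false := by
          have h1 : i = ((i.toNat : Nat) : Int) := by omega
          rw [h1]
          exact hbelow i.toNat (by omega)
        simp only [goA, ok_bridge, hfalse, Bool.false_eq_true, if_false]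
        exact ih (i + 1) (by omega) (by omega) (by omega)

-- the two searches agree
theorem okB_false_of_le (p : List Int) {a b : Int} (ha : 0 ≤ a) (hab : a ≤ b)
    (h : okB p b = false) : okB p a = false := by
  cases h' : okB p a with
  | false => rfl
  | true => rw [okB_mono p a b ha hab h'] at h; exact h.symm ▸ rfl

theorem galB_eq (p : List Int) : ∀ (f hi : Nat), 1 ≤ hi → hi ≤ 999999 →
    okB p ((hi / 2 : Nat) : Int) = false → 1999998 ≤ hi * 2 ^ f →
    galB p hi f = goA p 0 1000000 := by
  intro f
  induction f with
  | zero => intro hi h1 h2 _ hpow; simp at hpow; omega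
  | succ f ih =>
      intro hi h1 h2 hhalf hpow
      by_cases hok : okB p (hi : Int) = true
      · -- loop exits: binary search on [hi/2+1, hi]
        have hlo : ∀ j : Nat, j < hi / 2 + 1 → okB p (j : Int) = false := by
          intro j hj
          exact okB_false_of_le p (by positivity) (by push_cast; omega) hhalf
        obtain ⟨hok', hbelow, hle⟩ :=
          bgo_spec p hi (hi / 2 + 1) hi (by omega) (by omega) hok hlo
        rw [goA_finds p (bgo p (hi / 2 + 1) hi) hok' hbelow (by omega) 1000000 0 le_rfl rfl
          (by positivity)]
        simp [galB, hok]
      · have hokf : okB p (hi : Int) = false := by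
          cases h' : okB p (hi : Int) with
          | false => rfl
          | true => exact absurd h' hok
        by_cases hbig : 999999 ≤ hi
        · -- loop returns 0: nothing below 10^6 passes the check
          have hhi : hi = 999999 := by omega
          rw [goA_allfalse p 1000000 0 le_rfl (by omega) ?_]
          · simp [galB, hokf, hbig]
          · intro j hj hj6
            exact okB_false_of_le p hj (by omega) hokf
        · -- keep doubling
          have hrec : galB p hi (f + 1) = galB p (min (2 * hi) 999999) f := by
            simp [galB, hokf, hbig]
          rw [hrec]
          refine ih (min (2 * hi) 999999) (by omega) (by omega) ?_ ?_
          · exact okB_false_of_le p (by positivity) (by push_cast; omega) hokf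
          · rcases le_or_gt (2 * hi) 999999 with hc | hc
            · have : min (2 * hi) 999999 = 2 * hi := by omega
              rw [this]
              calc 1999998 ≤ hi * 2 ^ (f + 1) := hpow
                _ = 2 * hi * 2 ^ f := by ring
            · have hmin : min (2 * hi) 999999 = 999999 := by omega
              rw [hmin]
              have hf1 : 1 ≤ f := by
                by_contra hf0
                have : f = 0 := by omega
                subst this
                simp [pow_succ] at hpow
                omega
              have h2f : 2 ≤ 2 ^ f := by
                calc (2 : Nat) = 2 ^ 1 := by norm_num
                  _ ≤ 2 ^ f := Nat.pow_le_pow_right (by norm_num) hf1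
              nlinarith

-- the two searches agree
theorem search_eq (p : List Int) : goA p 0 1000000 = boundB p := by
  by_cases h0 : okB p 0 = true
  · have : goA p 0 1000000 = 0 := by
      rw [show (1000000 : Nat) = 999999 + 1 from rfl]
      simp [goA, ok_bridge, h0]
    rw [this, boundB, if_pos h0]
  · have h0f : okB p 0 = false := by
      cases h' : okB p (0 : Int) with
      | false => rfl
      | true => exact absurd h' h0
    rw [boundB, if_neg h0, ← galB_eq p 21 1 le_rfl (by omega) (by simpa using h0f) (by norm_num)]

-- A's two sign-flipping passes equal B's alternating-sign pass
theorem transform_eq (p : List Int) :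
    transformA p = (PySem.List.enumerate p).map (fun ic => if ic.1 % 2 == 0 then ic.2 else -ic.2) := by
  apply List.ext_getElem
  · simp [transformA, PySem.List.length_enumerate]
  · intro k h1 h2
    simp only [transformA, List.getElem_map, PySem.List.getElem_enumerate, List.length_map,
      PySem.List.length_enumerate] at h1 h2 ⊢
    have hk : k < p.length := by simpa [transformA, PySem.List.length_enumerate] using h2
    have ht : ((p.length : Int) - (0 + (k : Int)) - 1).toNat = p.length - 1 - k := by omega
    rw [ht, mul_assoc, ← pow_add]
    rcases Nat.even_or_odd k with he | ho
    · have hc : ((0 + (k : Int)) % 2 == 0) = true := by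
        obtain ⟨t, htk⟩ := he
        subst htk
        simp only [beq_iff_eq]
        push_cast
        omega
      rw [hc, if_pos rfl]
      obtain ⟨t, htk⟩ := he
      have : Even (p.length - 1 + (p.length - 1 - k)) := ⟨p.length - 1 - t, by omega⟩
      rw [this.neg_one_pow, mul_one]
    · have hc : ((0 + (k : Int)) % 2 == 0) = false := by
        obtain ⟨t, htk⟩ := ho
        subst htk
        simp only [beq_eq_false_iff_ne, ne_eq]
        push_cast
        omega
      rw [hc, if_neg (by simp)]
      obtain ⟨t, htk⟩ := ho
      have : Odd (p.length - 1 + (p.length - 1 - k)) := ⟨p.length - 1 - t - 1, by omega⟩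
      rw [this.neg_one_pow, mul_neg_one]

theorem Lab_4_spec : Claim_equal_Lab_4 := by
  intro poly _ _
  show Lab_4 poly = Lab_4_alt poly
  have hmap : poly.map (fun c => c * (-1)) = poly.map (fun c => -c) := by
    simp
  simp only [Lab_4, Lab_4_alt, hmap, transform_eq, search_eq, neg_one_mul]
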